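-- pv_equiv track=rewrite | github.com/beeware/beeware.github.io | packages/lektor_i18n_plugin/lektor_i18n.py | choose_language
-- ===== SOURCE A (Python) =====
-- def choose_language(l, language, fallback='en', attribute='language'):
--     """Will return from list 'l' the element with attribute 'attribute' set to given 'language'.
--     If none is found, will try to return element with attribute 'attribute' set to given 'fallback'.
--     Else returns None."""
--     language=language.strip().lower()
--     fallback=fallback.strip().lower()
--     for item in l:
--         if item[attribute].strip().lower()==language:
--             return item
--     # fallback
--     for item in l:
--         if item[attribute].strip().lower()==fallback:
--             return item
--     return None
-- ===== SOURCE B (Python) =====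
-- def choose_language(l, language, fallback='en', attribute='language'):
--     """Single pass: return first language match; remember first fallback match."""
--     language = language.strip().lower()
--     fallback = fallback.strip().lower()
--     fb = None
--     for item in l:
--         key = item[attribute].strip().lower()
--         if key == language:
--             return item
--         if fb is None and key == fallback:
--             fb = item
--     return fb
-- ===== Notes on version B (the rewrite author's own statement) =====
-- stated objective: simpler
-- what changed: A's two sequential scans (one for language, one for fallback) are merged into a single traversal that returns on a language match and remembers the first fallback match in a local variable.
import Mathlib
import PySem

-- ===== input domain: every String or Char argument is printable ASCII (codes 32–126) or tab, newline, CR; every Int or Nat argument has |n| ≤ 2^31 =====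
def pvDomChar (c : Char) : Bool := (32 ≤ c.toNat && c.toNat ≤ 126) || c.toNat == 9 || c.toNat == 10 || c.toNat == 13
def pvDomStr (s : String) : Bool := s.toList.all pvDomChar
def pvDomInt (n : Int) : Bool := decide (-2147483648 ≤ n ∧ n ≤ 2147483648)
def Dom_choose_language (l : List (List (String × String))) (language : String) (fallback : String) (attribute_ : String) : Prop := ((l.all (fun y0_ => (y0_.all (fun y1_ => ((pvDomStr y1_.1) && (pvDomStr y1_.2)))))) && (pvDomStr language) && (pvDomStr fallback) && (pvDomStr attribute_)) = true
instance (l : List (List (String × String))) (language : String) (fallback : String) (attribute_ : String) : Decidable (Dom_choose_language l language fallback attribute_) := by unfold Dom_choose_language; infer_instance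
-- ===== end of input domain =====

-- B merges A's two sequential scans into one pass that keeps the first fallback match; equivalence of the return value is proved on inputs where every item carries the attribute key.

-- ===== PORT A =====
-- item[attribute].strip().lower(); missing key (KeyError in Python) is excluded by Pre_, the port reads "" there
def pvNormKey (item : List (String × String)) (attribute_ : String) : String :=
  PySem.Str.lower (PySem.Str.strip ((List.lookup attribute_ item).getD ""))

-- one 'for item in l: if item[attribute]…== target: return item' loop of A (used twice, as A's code runs it twice)
def pvScanA (l : List (List (String × String))) (target : String) (attribute_ : String) : Option (List (String × String)) :=
  match l with
  | [] => none
  | item :: rest => if pvNormKey item attribute_ = target then some item else pvScanA rest target attribute_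

def choose_language (l : List (List (String × String))) (language : String) (fallback : String) (attribute_ : String) : Option (List (String × String)) :=
  let language := PySem.Str.lower (PySem.Str.strip language)
  let fallback := PySem.Str.lower (PySem.Str.strip fallback)
  match pvScanA l language attribute_ with
  | some item => some item
  | none =>
    match pvScanA l fallback attribute_ with
    | some item => some item
    | none => none

-- ===== PORT B =====
-- single loop with the fallback candidate fb carried as state
def pvLoopB (l : List (List (String × String))) (language fallback attribute_ : String) (fb : Option (List (String × String))) : Option (List (String × String)) :=
  match l with
  | [] => fb
  | item :: rest =>
    let key := pvNormKey item attribute_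
    if key = language then some item
    else  -- 'fb is None and key == fallback' short-circuits: match on fb first
      match fb with
      | none => if key = fallback then pvLoopB rest language fallback attribute_ (some item)
                else pvLoopB rest language fallback attribute_ none
      | some a => pvLoopB rest language fallback attribute_ (some a)

def choose_language_alt (l : List (List (String × String))) (language : String) (fallback : String) (attribute_ : String) : Option (List (String × String)) :=
  pvLoopB l (PySem.Str.lower (PySem.Str.strip language)) (PySem.Str.lower (PySem.Str.strip fallback)) attribute_ none

-- ===== PRECONDITION & SPEC =====
-- Pre_ excludes exactly the inputs on which Python A raises KeyError: an item without the
-- attribute key that is not preceded by an item whose normalized key equals the normalized language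
-- (A returns before reaching the faulty item in that case).
def Pre_choose_language (l : List (List (String × String))) (language : String) (fallback : String) (attribute_ : String) : Prop :=
  (List.range l.length).all (fun i =>
    ((List.lookup attribute_ (l.getD i [])).isSome ||
      (List.range i).any (fun j =>
        match List.lookup attribute_ (l.getD j []) with
        | some v => PySem.Str.lower (PySem.Str.strip v) == PySem.Str.lower (PySem.Str.strip language)
        | none => false))) = true
instance (l : List (List (String × String))) (language : String) (fallback : String) (attribute_ : String) : Decidable (Pre_choose_language l language fallback attribute_) := by unfold Pre_choose_language; infer_instance
def pvWitness_choose_language : (List (List (String × String))) × String × String × String :=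
  ([[("language", "fr")], [("language", " EN ")]], "de", "en", "language")

def Spec_choose_language (l : List (List (String × String))) (language : String) (fallback : String) (attribute_ : String) (out : Option (List (String × String))) : Prop := out = choose_language_alt l language fallback attribute_
instance (l : List (List (String × String))) (language : String) (fallback : String) (attribute_ : String) (out : Option (List (String × String))) : Decidable (Spec_choose_language l language fallback attribute_ out) := by unfold Spec_choose_language; infer_instance

-- ===== CLAIM (what is proved, stated in full; the proofs are below) =====
def Claim_equal_choose_language : Prop := ∀ (l : List (List (String × String))) (language : String) (fallback : String) (attribute_ : String), Dom_choose_language l language fallback attribute_ → Pre_choose_language l language fallback attribute_ → Spec_choose_language l language fallback attribute_ (choose_language l language fallback attribute_)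

-- ===== LEMMAS AND PROOFS =====

-- B's loop returns: the first language match if any; else the carried fb if set; else the first fallback match.
theorem pvLoopB_spec (l : List (List (String × String))) (language fallback attribute_ : String)
    (fb : Option (List (String × String))) :
    pvLoopB l language fallback attribute_ fb =
      match pvScanA l language attribute_ with
      | some x => some x
      | none => match fb with
        | some a => some a
        | none => pvScanA l fallback attribute_ := by
  induction l generalizing fb with
  | nil =>
    simp only [pvLoopB, pvScanA]
    cases fb <;> rfl
  | cons item rest ih =>
    simp only [pvLoopB, pvScanA]
    generalize pvNormKey item attribute_ = key
    by_cases h1 : key = language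
    · simp [h1]
    · cases fb with
      | some a =>
        simp only [h1, if_false, ih]
      | none =>
        by_cases h2 : key = fallback
        · have h3 : ¬ fallback = language := fun h => h1 (h2.trans h)
          simp only [h2, if_true, ih]
          cases pvScanA rest language attribute_ <;> simp [h3]
        · simp only [h1, if_false, h2, ih]

-- ===== VERDICT (by name: the statement is the Claim_ definition above) =====
theorem choose_language_spec : Claim_equal_choose_language := by
  intro l language fallback attribute_ _ _
  simp only [Spec_choose_language, choose_language, choose_language_alt, pvLoopB_spec]
  cases pvScanA l (PySem.Str.lower (PySem.Str.strip language)) attribute_ <;>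
    cases pvScanA l (PySem.Str.lower (PySem.Str.strip fallback)) attribute_ <;> rfl
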